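-- pv_equiv track=rewrite | github.com/AbhinavSingh111/HackerRank-DS | climbing_stairs_with_jumps.py | climbStairsVariableJumps
-- ===== SOURCE A (Python) =====
-- def climbStairsVariableJumps(i):
--     n=len(i)
--     l=[0]*(n+1)
--     l[n]=1
--     for j in range(n-1,-1,-1):
--         for k in range(1,i[j]+1):
--             if j+k<len(l):
--                 l[j]+=l[j+k]
--     return l[0]
-- ===== SOURCE B (Python) =====
-- def climbStairsVariableJumps(i):
--     # Suffix-sum stack, stored back-to-front: s[-1] is S(j) = l[j] + ... + l[n],
--     # with a sentinel S(n+1) = 0, so each l[j] range sum is two lookups, O(n) total.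
--     s = [0, 1]
--     for a in reversed(i):
--         m = a if a < len(s) - 1 else len(s) - 1
--         lj = s[-1] - s[-1 - m] if m > 0 else 0
--         s.append(lj + s[-1])
--     return s[-1] - s[-2]
-- ===== Notes on version B (the rewrite author's own statement) =====
-- stated objective: faster
-- what changed: Replaces the nested loop (for each step j, an inner loop summing l[j+1..j+i[j]] element by element) with a single right-to-left pass over a suffix-sum stack, so each range sum is a difference of two suffix sums.
import Mathlib
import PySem

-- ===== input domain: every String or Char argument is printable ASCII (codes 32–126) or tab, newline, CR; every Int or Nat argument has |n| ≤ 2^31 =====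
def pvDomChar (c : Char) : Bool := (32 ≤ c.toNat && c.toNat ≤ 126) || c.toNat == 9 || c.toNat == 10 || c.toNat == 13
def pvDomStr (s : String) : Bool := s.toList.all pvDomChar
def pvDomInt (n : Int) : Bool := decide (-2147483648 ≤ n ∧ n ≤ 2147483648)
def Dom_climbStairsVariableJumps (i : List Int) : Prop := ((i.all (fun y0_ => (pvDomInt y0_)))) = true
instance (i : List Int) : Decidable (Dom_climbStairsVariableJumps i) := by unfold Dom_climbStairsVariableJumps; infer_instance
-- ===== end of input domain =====

-- B replaces A's nested loop (an inner loop summing l[j+1..j+i[j]] element by element)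
-- with one right-to-left pass over a suffix-sum stack, so each range sum is a
-- difference of two suffix sums (objective: faster).

-- ===== PORT A =====
def climbStairsVariableJumps (i : List Int) : Int :=
  let n : Int := PySem.List.len i
  let l0 : List Int := PySem.List.pySetD (PySem.List.pyRepeat [(0 : Int)] (n + 1)) n 1
  let l : List Int := (PySem.List.pyRange (n - 1) (-1) (-1)).foldl (fun l j =>
    (PySem.List.pyRange 1 (PySem.List.pyGetD i j 0 + 1) 1).foldl (fun l k =>
      if j + k < PySem.List.len l then
        PySem.List.pySetD l j (PySem.List.pyGetD l j 0 + PySem.List.pyGetD l (j + k) 0)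
      else l) l) l0
  PySem.List.pyGetD l 0 0

-- ===== PORT B =====
def climbStairsVariableJumps_alt (i : List Int) : Int :=
  let s : List Int := i.reverse.foldl (fun s a =>
    let m : Int := if a < PySem.List.len s - 1 then a else PySem.List.len s - 1
    let lj : Int := if 0 < m then PySem.List.pyGetD s (-1) 0 - PySem.List.pyGetD s (-1 - m) 0 else 0
    s ++ [lj + PySem.List.pyGetD s (-1) 0]) [0, 1]
  PySem.List.pyGetD s (-1) 0 - PySem.List.pyGetD s (-2) 0

-- ===== PRECONDITION & SPEC =====
def Spec_climbStairsVariableJumps (i : List Int) (out : Int) : Prop := out = climbStairsVariableJumps_alt i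
instance (i : List Int) (out : Int) : Decidable (Spec_climbStairsVariableJumps i out) := by unfold Spec_climbStairsVariableJumps; infer_instance

-- ===== CLAIM (what is proved, stated in full; the proofs are below) =====
def Claim_equal_climbStairsVariableJumps : Prop := ∀ (i : List Int), Dom_climbStairsVariableJumps i → Spec_climbStairsVariableJumps i (climbStairsVariableJumps i)

-- ===== LEMMAS AND PROOFS =====

/-- The table A fills, as a function of the suffix of `i`: `ideal (i.drop j) = [l j, …, l n]`. -/
def ideal : List Int → List Int
  | [] => [1]
  | a :: rest => ((ideal rest).take a.toNat).sum :: ideal rest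

/-- Suffix sums with a trailing 0 sentinel: `(SS t).getD k 0 = (t.drop k).sum`. -/
def SS : List Int → List Int
  | [] => [0]
  | x :: xs => (x + (SS xs).getD 0 0) :: SS xs

theorem length_ideal (t : List Int) : (ideal t).length = t.length + 1 := by
  induction t with
  | nil => simp [ideal]
  | cons a rest ih => simp [ideal, ih]

theorem length_SS (t : List Int) : (SS t).length = t.length + 1 := by
  induction t with
  | nil => simp [SS]
  | cons x xs ih => simp [SS, ih]

theorem SS_getD (t : List Int) (k : Nat) (hk : k ≤ t.length) :
    (SS t).getD k 0 = (t.drop k).sum := by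
  induction t generalizing k with
  | nil =>
    simp only [List.length_nil, Nat.le_zero] at hk
    subst hk; simp [SS]
  | cons x xs ih =>
    cases k with
    | zero =>
      rw [show SS (x :: xs) = (x + (SS xs).getD 0 0) :: SS xs from rfl, List.getD_cons_zero,
        ih 0 (Nat.zero_le _)]
      simp
    | succ k' =>
      rw [show SS (x :: xs) = (x + (SS xs).getD 0 0) :: SS xs from rfl, List.getD_cons_succ]
      exact ih k' (by simpa using hk)

theorem SS_getD' (t : List Int) (k : Nat) (hk : k ≤ t.length) :
    (SS t)[k]?.getD 0 = (t.drop k).sum := by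
  simpa [List.getD] using SS_getD t k hk

/-- Reading a reversed list at Python index `-1 - m` is reading the list at `m`. -/
theorem pyGetD_rev_int (xs : List Int) (m : Int) (h0 : 0 ≤ m) (hm : m < (xs.length : Int)) :
    PySem.List.pyGetD xs.reverse (-1 - m) 0 = xs.getD m.toNat 0 := by
  obtain ⟨mn, rfl⟩ := Int.eq_ofNat_of_zero_le h0
  have hmn : mn < xs.length := by exact_mod_cast hm
  have h1 : (-1 - (mn : Int)) = -((mn + 1 : Nat) : Int) := by push_cast; ring
  rw [h1, PySem.List.pyGetD_neg_natCast _ _ _ (by omega) (by simp; omega)]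
  simp only [Int.toNat_natCast]
  rw [List.getD_eq_getElem _ _ hmn, List.getElem_eq_getElem_reverse hmn]
  congr 1
  simp only [List.length_reverse]
  omega

/-- Writing slot `j` does not change a read at a different nonnegative index. -/
theorem pyGetD_set_ne (l : List Int) (j : Nat) (v : Int) (idx : Int) (hpos : 0 ≤ idx)
    (hne : idx ≠ (j : Int)) :
    PySem.List.pyGetD (l.set j v) idx 0 = PySem.List.pyGetD l idx 0 := by
  by_cases hlt : idx < (l.length : Int)
  · rw [PySem.List.pyGetD_eq_getElem _ _ hpos (by simpa using hlt),
      PySem.List.pyGetD_eq_getElem _ _ hpos hlt]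
    exact List.getElem_set_ne (by omega) _
  · have e1 : PySem.List.pyGet? (l.set j v) idx = none := by
      rw [PySem.List.pyGet?_eq_none_iff]
      simp [PySem.Raise.InRange]
      omega
    have e2 : PySem.List.pyGet? l idx = none := by
      rw [PySem.List.pyGet?_eq_none_iff]
      simp [PySem.Raise.InRange]
      omega
    rw [PySem.List.pyGetD_of_none _ _ _ e1, PySem.List.pyGetD_of_none _ _ _ e2]

/-- One pass of A's inner loop: only slot `j` changes, accumulating the guarded reads. -/
theorem innerA (jn : Nat) (ks : List Int) (hks : ∀ k ∈ ks, 1 ≤ k) (l : List Int)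
    (hj : jn < l.length) :
    ks.foldl (fun l k =>
      if (jn : Int) + k < PySem.List.len l then
        PySem.List.pySetD l (jn : Int) (PySem.List.pyGetD l (jn : Int) 0 + PySem.List.pyGetD l ((jn : Int) + k) 0)
      else l) l
    = l.set jn (l.getD jn 0 +
        (ks.map (fun k => if (jn : Int) + k < (l.length : Int) then PySem.List.pyGetD l ((jn : Int) + k) 0 else 0)).sum) := by
  induction ks generalizing l with
  | nil =>
    rw [List.getD_eq_getElem _ _ hj]
    simp [List.set_getElem_self hj]
  | cons k ks ih =>
    simp only [List.foldl_cons, List.map_cons, List.sum_cons]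
    have hk1 : (1 : Int) ≤ k := hks k (by simp)
    by_cases hc : (jn : Int) + k < (l.length : Int)
    · rw [if_pos (by simpa using hc)]
      have hstep : PySem.List.pySetD l (jn : Int)
            (PySem.List.pyGetD l (jn : Int) 0 + PySem.List.pyGetD l ((jn : Int) + k) 0)
          = l.set jn (l.getD jn 0 + PySem.List.pyGetD l ((jn : Int) + k) 0) := by simp
      rw [hstep]
      set v1 : Int := l.getD jn 0 + PySem.List.pyGetD l ((jn : Int) + k) 0 with hv1
      rw [ih (fun k' hk' => hks k' (by simp [hk'])) (l.set jn v1) (by simpa using hj)]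
      have hreads : ∀ k' ∈ ks,
          (if (jn : Int) + k' < ((l.set jn v1).length : Int) then PySem.List.pyGetD (l.set jn v1) ((jn : Int) + k') 0 else 0)
          = (if (jn : Int) + k' < (l.length : Int) then PySem.List.pyGetD l ((jn : Int) + k') 0 else 0) := by
        intro k' hk'
        have h1 : (1 : Int) ≤ k' := hks k' (by simp [hk'])
        have h2 : PySem.List.pyGetD (l.set jn v1) ((jn : Int) + k') 0 = PySem.List.pyGetD l ((jn : Int) + k') 0 :=
          pyGetD_set_ne l jn v1 _ (by omega) (by omega)
        rw [List.length_set, h2]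
      rw [List.map_congr_left hreads, List.set_set]
      have hgetset : (l.set jn v1).getD jn 0 = v1 := by
        rw [List.getD_eq_getElem _ _ (by simpa using hj)]
        exact List.getElem_set_self (by simpa using hj)
      rw [hgetset, if_pos hc, hv1]
      congr 1
      ring
    · rw [if_neg (by simpa using hc), if_neg hc, zero_add]
      exact ih (fun k' hk' => hks k' (by simp [hk'])) l hj

theorem sum_ite_range_take (t : List Int) (m : Nat) :
    ((List.range m).map (fun u => if u < t.length then t.getD u 0 else 0)).sum
      = (t.take m).sum := by
  induction m with
  | zero => simp
  | succ m ih =>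
    rw [List.range_succ, List.map_append, List.sum_append, ih, List.take_add_one]
    by_cases h : m < t.length
    · simp [h, List.getD]
    · have h1 : t[m]? = none := List.getElem?_eq_none (by omega)
      have h2 : t.take (m + 1) = t := List.take_of_length_le (by omega)
      have h3 : t.take m = t := List.take_of_length_le (by omega)
      simp [h, h3]

theorem set_replicate_append (j : Nat) (t : List Int) (v : Int) :
    (List.replicate (j + 1) (0 : Int) ++ t).set j v = List.replicate j 0 ++ v :: t := by
  rw [List.replicate_succ', List.append_assoc, List.set_append_right _ _ (by simp)]
  simp

theorem outerA (i : List Int) (c : Nat) (hc : c ≤ i.length) :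
    ((List.range c).map (fun (k : Nat) => (i.length : Int) - 1 - (k : Int))).foldl
      (fun l j =>
        (PySem.List.pyRange 1 (PySem.List.pyGetD i j 0 + 1) 1).foldl (fun l k =>
          if j + k < PySem.List.len l then
            PySem.List.pySetD l j (PySem.List.pyGetD l j 0 + PySem.List.pyGetD l (j + k) 0)
          else l) l)
      (List.replicate i.length 0 ++ [1])
    = List.replicate (i.length - c) 0 ++ ideal (i.drop (i.length - c)) := by
  induction c with
  | zero => simp [List.drop_of_length_le, ideal]
  | succ c ih =>
    have hcn : c < i.length := by omega
    rw [List.range_succ, List.map_append, List.foldl_append, ih (by omega)]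
    simp only [List.map_cons, List.map_nil, List.foldl_cons, List.foldl_nil]
    have hcast : (i.length : Int) - 1 - (c : Int) = ((i.length - 1 - c : Nat) : Int) := by
      omega
    rw [hcast]
    set j : Nat := i.length - 1 - c with hjdef
    have hjn : j < i.length := by omega
    have hnc : i.length - c = j + 1 := by omega
    rw [hnc]
    set t := ideal (i.drop (j + 1)) with ht
    have hlt : t.length = i.length - j := by
      rw [ht, length_ideal, List.length_drop]; omega
    set st := List.replicate (j + 1) (0 : Int) ++ t with hst
    have hstlen : st.length = i.length + 1 := by
      rw [hst]; simp [hlt]; omega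
    set a : Int := PySem.List.pyGetD i (j : Int) 0 with ha
    have hrange : PySem.List.pyRange 1 (a + 1) 1
        = (List.range a.toNat).map (fun (u : Nat) => 1 + (u : Int)) := by
      have h' : a + 1 - 1 = a := by ring
      rw [PySem.List.pyRange_one, h']
    rw [hrange, innerA j _ (by
        intro k hk
        simp only [List.mem_map, List.mem_range] at hk
        obtain ⟨u, _, rfl⟩ := hk
        omega) st (by omega)]
    have hget0 : st.getD j 0 = 0 := by
      rw [hst, List.getD_append _ _ _ _ (by simp)]
      rw [List.getD_eq_getElem _ _ (by simp)]
      simp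
    have hreads : ∀ u ∈ List.range a.toNat,
        ((fun k => if (j : Int) + k < (st.length : Int) then PySem.List.pyGetD st ((j : Int) + k) 0 else 0)
          ∘ (fun (u : Nat) => 1 + (u : Int))) u
        = (if u < t.length then t.getD u 0 else 0) := by
      intro u _
      have hidx : (j : Int) + (1 + (u : Int)) = ((j + 1 + u : Nat) : Int) := by push_cast; ring
      simp only [Function.comp_apply, hidx, PySem.List.pyGetD_natCast]
      by_cases hu : u < t.length
      · rw [if_pos (by rw [hstlen]; exact_mod_cast (by omega : j + 1 + u < i.length + 1)), if_pos hu]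
        rw [hst, show j + 1 + u = (List.replicate (j + 1) (0 : Int)).length + u by simp]
        simp [List.getD, List.getElem?_append_right]
      · rw [if_neg (by rw [hstlen]; exact_mod_cast (by omega : ¬ ((j + 1 + u : Int) < (i.length : Int) + 1))), if_neg hu]
    rw [List.map_map, List.map_congr_left hreads, sum_ite_range_take, hget0, zero_add,
      hst, set_replicate_append]
    have hdrop : i.drop j = i[j] :: i.drop (j + 1) := List.drop_eq_getElem_cons hjn
    have ha' : a = i[j] := by
      rw [ha, PySem.List.pyGetD_natCast, List.getD_eq_getElem _ _ hjn]
    rw [show i.length - (c + 1) = j by omega, hdrop]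
    rw [show ideal (i[j] :: i.drop (j + 1)) = ((ideal (i.drop (j + 1))).take i[j].toNat).sum :: ideal (i.drop (j + 1)) from rfl]
    rw [ha', ht]

theorem a_eq_ideal (i : List Int) : climbStairsVariableJumps i = (ideal i).getD 0 0 := by
  rw [show climbStairsVariableJumps i = PySem.List.pyGetD
    ((PySem.List.pyRange (PySem.List.len i - 1) (-1) (-1)).foldl (fun l j =>
      (PySem.List.pyRange 1 (PySem.List.pyGetD i j 0 + 1) 1).foldl (fun l k =>
        if j + k < PySem.List.len l then
          PySem.List.pySetD l j (PySem.List.pyGetD l j 0 + PySem.List.pyGetD l (j + k) 0)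
        else l) l)
      (PySem.List.pySetD (PySem.List.pyRepeat [(0 : Int)] (PySem.List.len i + 1)) (PySem.List.len i) 1))
    0 0 from rfl]
  have hlen : PySem.List.len i = (i.length : Int) := by simp
  have hl0 : PySem.List.pySetD (PySem.List.pyRepeat [(0 : Int)] (PySem.List.len i + 1)) (PySem.List.len i) 1
      = List.replicate i.length 0 ++ [1] := by
    rw [hlen, PySem.List.pyRepeat_singleton, show ((i.length : Int) + 1).toNat = i.length + 1 by omega,
      PySem.List.pySetD_natCast]
    have := set_replicate_append i.length [] 1
    simpa using this
  have hrange : PySem.List.pyRange (PySem.List.len i - 1) (-1) (-1)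
      = (List.range i.length).map (fun (k : Nat) => (i.length : Int) - 1 - (k : Int)) := by
    rw [hlen, PySem.List.pyRange_neg_one,
      show (i.length : Int) - 1 - (-1) = (i.length : Int) by ring]
    simp only [Int.toNat_natCast]
  rw [hrange, hl0, outerA i i.length le_rfl]
  simp [PySem.List.pyGetD_zero]

/-- B's loop invariant: the stack is the reversed suffix-sum list of the ideal table. -/
theorem invB (rest : List Int) :
    rest.reverse.foldl (fun s a =>
      let m : Int := if a < PySem.List.len s - 1 then a else PySem.List.len s - 1
      let lj : Int := if 0 < m then PySem.List.pyGetD s (-1) 0 - PySem.List.pyGetD s (-1 - m) 0 else 0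
      s ++ [lj + PySem.List.pyGetD s (-1) 0]) [0, 1]
    = (SS (ideal rest)).reverse := by
  induction rest with
  | nil => decide
  | cons a r ih =>
    rw [List.reverse_cons, List.foldl_append, ih]
    simp only [List.foldl_cons, List.foldl_nil]
    set t := ideal r with ht
    have htl : t.length = r.length + 1 := length_ideal r
    have hslen : ((SS t).reverse).length = t.length + 1 := by simp [length_SS]
    have hlenE : PySem.List.len ((SS t).reverse) = (t.length : Int) + 1 := by
      simp [length_SS]
    have hg1 : PySem.List.pyGetD ((SS t).reverse) (-1) 0 = t.sum := by
      have h := pyGetD_rev_int (SS t) 0 (le_refl 0) (by rw [length_SS]; exact_mod_cast Nat.lt_succ_of_le (Nat.zero_le _))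
      norm_num at h
      rw [h]
      simpa using SS_getD' t 0 (Nat.zero_le _)
    have hgm : ∀ m : Int, 0 < m → m ≤ (t.length : Int) →
        PySem.List.pyGetD ((SS t).reverse) (-1 - m) 0 = (t.drop m.toNat).sum := by
      intro m hm0 hml
      rw [pyGetD_rev_int (SS t) m (by omega) (by rw [length_SS]; push_cast; omega)]
      exact SS_getD t m.toNat (by omega)
    have key : (if 0 < (if a < PySem.List.len ((SS t).reverse) - 1 then a else PySem.List.len ((SS t).reverse) - 1) then
          PySem.List.pyGetD ((SS t).reverse) (-1) 0 -
            PySem.List.pyGetD ((SS t).reverse) (-1 - (if a < PySem.List.len ((SS t).reverse) - 1 then a else PySem.List.len ((SS t).reverse) - 1)) 0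
        else 0) = (t.take a.toNat).sum := by
      rw [hlenE]
      have hsimp : (t.length : Int) + 1 - 1 = (t.length : Int) := by ring
      rw [hsimp]
      by_cases hal : a < (t.length : Int)
      · rw [if_pos hal]
        by_cases ha0 : 0 < a
        · rw [if_pos ha0, hg1, hgm a ha0 (by omega)]
          have := List.sum_take_add_sum_drop t a.toNat
          omega
        · rw [if_neg ha0, show a.toNat = 0 by omega]
          simp
      · rw [if_neg hal, if_pos (by omega), hg1, hgm (t.length : Int) (by omega) le_rfl]
        rw [show ((t.length : Int)).toNat = t.length by omega]
        rw [List.take_of_length_le (by omega)]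
        simp
    rw [key]
    rw [show SS (ideal (a :: r)) = ((((ideal r).take a.toNat).sum) + (SS (ideal r)).getD 0 0) :: SS (ideal r) from rfl]
    rw [List.reverse_cons, ← ht, SS_getD t 0 (Nat.zero_le _), List.drop_zero, hg1]

theorem b_eq_ideal (i : List Int) : climbStairsVariableJumps_alt i = (ideal i).getD 0 0 := by
  rw [show climbStairsVariableJumps_alt i =
      PySem.List.pyGetD (i.reverse.foldl (fun s a =>
        let m : Int := if a < PySem.List.len s - 1 then a else PySem.List.len s - 1
        let lj : Int := if 0 < m then PySem.List.pyGetD s (-1) 0 - PySem.List.pyGetD s (-1 - m) 0 else 0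
        s ++ [lj + PySem.List.pyGetD s (-1) 0]) [0, 1]) (-1) 0
      - PySem.List.pyGetD (i.reverse.foldl (fun s a =>
        let m : Int := if a < PySem.List.len s - 1 then a else PySem.List.len s - 1
        let lj : Int := if 0 < m then PySem.List.pyGetD s (-1) 0 - PySem.List.pyGetD s (-1 - m) 0 else 0
        s ++ [lj + PySem.List.pyGetD s (-1) 0]) [0, 1]) (-2) 0 from rfl]
  rw [invB i]
  set u := ideal i with hu
  have hul : u.length = i.length + 1 := length_ideal i
  have h1 : PySem.List.pyGetD ((SS u).reverse) (-1) 0 = u.sum := by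
    have h := pyGetD_rev_int (SS u) 0 (le_refl 0) (by rw [length_SS]; exact_mod_cast Nat.lt_succ_of_le (Nat.zero_le _))
    norm_num at h
    rw [h]
    simpa using SS_getD' u 0 (Nat.zero_le _)
  have h2 : PySem.List.pyGetD ((SS u).reverse) (-2) 0 = (u.drop 1).sum := by
    have h := pyGetD_rev_int (SS u) 1 (by norm_num) (by rw [length_SS]; push_cast; omega)
    norm_num at h
    rw [h]
    exact SS_getD' u 1 (by omega)
  rw [h1, h2]
  obtain ⟨v, w, hvw⟩ : ∃ v w, u = v :: w := by
    rw [hu]; cases i <;> exact ⟨_, _, rfl⟩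
  rw [hvw]
  simp

-- ===== VERDICT (by name: the statement is the Claim_ definition above) =====
theorem climbStairsVariableJumps_spec : Claim_equal_climbStairsVariableJumps := by
  intro i _
  unfold Spec_climbStairsVariableJumps
  rw [a_eq_ideal, b_eq_ideal]
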